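-- pv_equiv track=rewrite | github.com/zuevav/SIEM_FONT | backend/app/services/incident_correlation.py | _determine_incident_category
-- ===== SOURCE A (Python) =====
-- from typing import List, Dict, Any, Optional, Set
--
-- def _determine_incident_category(mitre_tactics: Set[str]) -> str:
--     """
--     Determine incident category based on MITRE tactics
--     """
--     tactics_lower = {t.lower() for t in mitre_tactics if t}
--
--     if 'impact' in tactics_lower:
--         return 'Ransomware/Data Destruction'
--     elif 'exfiltration' in tactics_lower:
--         return 'Data Exfiltration'
--     elif 'credential access' in tactics_lower or 'lateral movement' in tactics_lower:
--         return 'Credential Theft / Lateral Movement'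
--     elif 'command and control' in tactics_lower:
--         return 'Command & Control'
--     elif 'persistence' in tactics_lower or 'privilege escalation' in tactics_lower:
--         return 'Persistence / Privilege Escalation'
--     elif 'initial access' in tactics_lower or 'execution' in tactics_lower:
--         return 'Initial Access / Execution'
--     else:
--         return 'Suspicious Activity'
-- ===== SOURCE B (Python) =====
-- _PRIORITY = {
--     'impact': 0,
--     'exfiltration': 1,
--     'credential access': 2,
--     'lateral movement': 2,
--     'command and control': 3,
--     'persistence': 4,
--     'privilege escalation': 4,
--     'initial access': 5,
--     'execution': 5,
-- }
--
-- _CATEGORIES = [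
--     'Ransomware/Data Destruction',
--     'Data Exfiltration',
--     'Credential Theft / Lateral Movement',
--     'Command & Control',
--     'Persistence / Privilege Escalation',
--     'Initial Access / Execution',
--     'Suspicious Activity',
-- ]
--
--
-- def _determine_incident_category(mitre_tactics):
--     best = 6
--     for t in mitre_tactics:
--         if t:
--             best = min(best, _PRIORITY.get(t.lower(), 6))
--     return _CATEGORIES[best]
-- ===== Notes on version B (the rewrite author's own statement) =====
-- stated objective: alternative
-- what changed: Instead of building a set and running a cascade of membership tests, B folds a minimum priority rank over the tactics in one pass (dict tactic->rank, unknown=6) and indexes a category table by the resulting minimum.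
import Mathlib
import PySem

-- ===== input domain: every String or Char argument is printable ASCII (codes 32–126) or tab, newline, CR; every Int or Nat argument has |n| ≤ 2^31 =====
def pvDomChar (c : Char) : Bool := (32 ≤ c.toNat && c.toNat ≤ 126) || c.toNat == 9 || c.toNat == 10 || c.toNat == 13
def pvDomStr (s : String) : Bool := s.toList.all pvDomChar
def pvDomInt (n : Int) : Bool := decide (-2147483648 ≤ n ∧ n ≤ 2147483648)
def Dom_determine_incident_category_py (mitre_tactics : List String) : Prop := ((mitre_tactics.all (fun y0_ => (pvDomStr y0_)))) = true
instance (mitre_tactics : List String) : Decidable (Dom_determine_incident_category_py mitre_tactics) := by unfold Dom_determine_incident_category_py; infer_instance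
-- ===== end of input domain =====

-- B replaces A's set-then-cascade with one fold computing the minimum priority rank of the tactics, then indexes a category table (alternative decomposition, same cost).


-- ===== PORT A =====
def determine_incident_category_py (mitre_tactics : List String) : String :=
  let tactics_lower : PySem.Set String :=
    PySem.Set.ofList ((mitre_tactics.filter (fun t => t ≠ "")).map PySem.Str.lower)
  if tactics_lower.contains "impact" then "Ransomware/Data Destruction"
  else if tactics_lower.contains "exfiltration" then "Data Exfiltration"
  else if tactics_lower.contains "credential access" || tactics_lower.contains "lateral movement" then
    "Credential Theft / Lateral Movement"
  else if tactics_lower.contains "command and control" then "Command & Control"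
  else if tactics_lower.contains "persistence" || tactics_lower.contains "privilege escalation" then
    "Persistence / Privilege Escalation"
  else if tactics_lower.contains "initial access" || tactics_lower.contains "execution" then
    "Initial Access / Execution"
  else "Suspicious Activity"

-- ===== PORT B =====
-- Source B's module-level _PRIORITY dict (tactic -> priority rank)
def pvPriority : PySem.Dict String Int :=
  PySem.Dict.ofList
    [ ("impact", 0), ("exfiltration", 1),
      ("credential access", 2), ("lateral movement", 2),
      ("command and control", 3),
      ("persistence", 4), ("privilege escalation", 4),
      ("initial access", 5), ("execution", 5) ]

-- Source B's module-level _CATEGORIES list (indexed by priority rank)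
def pvCategories : List String :=
  [ "Ransomware/Data Destruction", "Data Exfiltration",
    "Credential Theft / Lateral Movement", "Command & Control",
    "Persistence / Privilege Escalation", "Initial Access / Execution",
    "Suspicious Activity" ]

def determine_incident_category_py_alt (mitre_tactics : List String) : String :=
  let best : Int := mitre_tactics.foldl
    (fun best t => if t ≠ "" then min best (pvPriority.getD (PySem.Str.lower t) 6) else best) 6
  PySem.List.pyGetD pvCategories best ""

-- ===== PRECONDITION & SPEC =====
def Spec_determine_incident_category_py (mitre_tactics : List String) (out : String) : Prop := out = determine_incident_category_py_alt mitre_tactics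
instance (mitre_tactics : List String) (out : String) : Decidable (Spec_determine_incident_category_py mitre_tactics out) := by unfold Spec_determine_incident_category_py; infer_instance

-- ===== CLAIM (what is proved, stated in full; the proofs are below) =====
def Claim_equal_determine_incident_category_py : Prop := ∀ (mitre_tactics : List String), Dom_determine_incident_category_py mitre_tactics → Spec_determine_incident_category_py mitre_tactics (determine_incident_category_py mitre_tactics)

-- ===== LEMMAS AND PROOFS =====

-- the rank a tactic contributes in B's fold
def pvPrio (x : String) : Int := pvPriority.getD x 6

-- closed form of the dict lookup
theorem pvPrio_eq (x : String) : pvPrio x =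
    (if x = "impact" then 0 else if x = "exfiltration" then 1
     else if x = "credential access" then 2 else if x = "lateral movement" then 2
     else if x = "command and control" then 3
     else if x = "persistence" then 4 else if x = "privilege escalation" then 4
     else if x = "initial access" then 5 else if x = "execution" then 5 else 6) := by
  have hm : pvPriority = PySem.Dict.mk
      [ ("impact", 0), ("exfiltration", 1),
        ("credential access", 2), ("lateral movement", 2),
        ("command and control", 3),
        ("persistence", 4), ("privilege escalation", 4),
        ("initial access", 5), ("execution", 5) ] := by decide
  by_cases h0 : x = "impact"
  · subst h0; decide
  by_cases h1 : x = "exfiltration"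
  · subst h1; decide
  by_cases h2 : x = "credential access"
  · subst h2; decide
  by_cases h3 : x = "lateral movement"
  · subst h3; decide
  by_cases h4 : x = "command and control"
  · subst h4; decide
  by_cases h5 : x = "persistence"
  · subst h5; decide
  by_cases h6 : x = "privilege escalation"
  · subst h6; decide
  by_cases h7 : x = "initial access"
  · subst h7; decide
  by_cases h8 : x = "execution"
  · subst h8; decide
  simp [pvPrio, PySem.Dict.getD, hm, beq_iff_eq,
    Ne.symm h0, Ne.symm h1, Ne.symm h2, Ne.symm h3, Ne.symm h4, Ne.symm h5,
    Ne.symm h6, Ne.symm h7, Ne.symm h8, h0, h1, h2, h3, h4, h5, h6, h7, h8,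
    PySem.Dict.get?]

theorem pvPrio_nonneg (x : String) : 0 ≤ pvPrio x := by
  rw [pvPrio_eq]; split_ifs <;> norm_num

def pvStep : Int → String → Int :=
  fun b t => if t ≠ "" then min b (pvPriority.getD (PySem.Str.lower t) 6) else b

theorem pvFold_le (L : List String) (a : Int) : L.foldl pvStep a ≤ a := by
  induction L generalizing a with
  | nil => simp
  | cons t L ih =>
      simp only [List.foldl_cons]
      refine le_trans (ih _) ?_
      simp only [pvStep]; split_ifs <;> simp

theorem pvFold_nonneg (L : List String) (a : Int) (ha : 0 ≤ a) : 0 ≤ L.foldl pvStep a := by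
  induction L generalizing a with
  | nil => simpa
  | cons t L ih =>
      simp only [List.foldl_cons]
      refine ih _ ?_
      simp only [pvStep]; split_ifs with h
      · exact le_min ha (pvPrio_nonneg _)
      · exact ha

theorem pvFold_mem (L : List String) (a : Int) (t : String) (ht : t ∈ L) (hne : t ≠ "") :
    L.foldl pvStep a ≤ pvPrio (PySem.Str.lower t) := by
  induction L generalizing a with
  | nil => cases ht
  | cons u L ih =>
      simp only [List.foldl_cons]
      rcases List.mem_cons.1 ht with h | h
      · subst h
        refine le_trans (pvFold_le _ _) ?_
        simp only [pvStep, if_pos hne]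
        exact min_le_right _ _
      · exact ih _ h

theorem pvFold_cases (L : List String) (a : Int) :
    L.foldl pvStep a = a ∨ ∃ t ∈ L, t ≠ "" ∧ L.foldl pvStep a = pvPrio (PySem.Str.lower t) := by
  induction L generalizing a with
  | nil => exact Or.inl rfl
  | cons u L ih =>
      simp only [List.foldl_cons]
      rcases ih (pvStep a u) with h | ⟨t, htL, htne, heq⟩
      · rw [h]
        simp only [pvStep]
        split_ifs with hu
        · rcases min_cases a (pvPrio (PySem.Str.lower u)) with ⟨he, _⟩ | ⟨he, _⟩
          · exact Or.inl he
          · exact Or.inr ⟨u, List.mem_cons_self, hu, he⟩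
        · exact Or.inl rfl
      · exact Or.inr ⟨t, List.mem_cons_of_mem _ htL, htne, heq⟩

-- membership in A's lowered set ↔ a matching tactic in the input
theorem pv_mem_iff (L : List String) (x : String) :
    x ∈ PySem.Set.ofList ((L.filter (fun t => t ≠ "")).map PySem.Str.lower) ↔
      ∃ t ∈ L, t ≠ "" ∧ PySem.Str.lower t = x := by
  rw [PySem.Set.mem_ofList]
  simp only [List.mem_map, List.mem_filter]
  constructor
  · rintro ⟨t, ⟨htL, htne⟩, hx⟩
    exact ⟨t, htL, by simpa using htne, hx⟩
  · rintro ⟨t, htL, htne, hx⟩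
    exact ⟨t, ⟨htL, by simpa using htne⟩, hx⟩

-- best ≤ rank of any keyword present in A's lowered set
theorem pv_best_le (L : List String) (x : String)
    (h : x ∈ PySem.Set.ofList ((L.filter (fun t => t ≠ "")).map PySem.Str.lower)) :
    L.foldl pvStep 6 ≤ pvPrio x := by
  rcases (pv_mem_iff L x).1 h with ⟨t, htL, htne, hx⟩
  simpa [hx] using pvFold_mem L 6 t htL htne

-- if best = k < 6 then a keyword of rank k is in A's lowered set
theorem pv_best_hit (L : List String) (k : Int) (hk : k < 6)
    (h : L.foldl pvStep 6 = k) :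
    ∃ x : String, pvPrio x = k ∧
      x ∈ PySem.Set.ofList ((L.filter (fun t => t ≠ "")).map PySem.Str.lower) := by
  rcases pvFold_cases L 6 with he | ⟨t, htL, htne, heq⟩
  · omega
  · exact ⟨PySem.Str.lower t, by omega, (pv_mem_iff L _).2 ⟨t, htL, htne, rfl⟩⟩

-- rank inversion: which keywords have a given rank
theorem pvRank0 (x : String) (h : pvPrio x = 0) : x = "impact" := by
  rw [pvPrio_eq] at h; split_ifs at h <;> first | assumption | omega
theorem pvRank1 (x : String) (h : pvPrio x = 1) : x = "exfiltration" := by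
  rw [pvPrio_eq] at h; split_ifs at h <;> first | assumption | omega
theorem pvRank2 (x : String) (h : pvPrio x = 2) : x = "credential access" ∨ x = "lateral movement" := by
  rw [pvPrio_eq] at h; split_ifs at h <;> first | (left; assumption) | (right; assumption) | omega
theorem pvRank3 (x : String) (h : pvPrio x = 3) : x = "command and control" := by
  rw [pvPrio_eq] at h; split_ifs at h <;> first | assumption | omega
theorem pvRank4 (x : String) (h : pvPrio x = 4) : x = "persistence" ∨ x = "privilege escalation" := by
  rw [pvPrio_eq] at h; split_ifs at h <;> first | (left; assumption) | (right; assumption) | omega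
theorem pvRank5 (x : String) (h : pvPrio x = 5) : x = "initial access" ∨ x = "execution" := by
  rw [pvPrio_eq] at h; split_ifs at h <;> first | (left; assumption) | (right; assumption) | omega

-- B's result once the fold's value is known
theorem pvB_eq (L : List String) (k : Int) (hv : L.foldl pvStep 6 = k) :
    determine_incident_category_py_alt L = PySem.List.pyGetD pvCategories k "" := by
  show PySem.List.pyGetD pvCategories (L.foldl pvStep 6) "" = PySem.List.pyGetD pvCategories k ""
  rw [hv]

theorem pv_main (L : List String) :
    determine_incident_category_py L = determine_incident_category_py_alt L := by
  have h0 : (0:Int) ≤ L.foldl pvStep 6 := pvFold_nonneg L 6 (by norm_num)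
  have h6 : L.foldl pvStep 6 ≤ 6 := pvFold_le L 6
  have hle := pv_best_le L
  have hhit := pv_best_hit L
  set s := PySem.Set.ofList ((L.filter (fun t => t ≠ "")).map PySem.Str.lower) with hs
  have hA : determine_incident_category_py L =
      (if s.contains "impact" then "Ransomware/Data Destruction"
       else if s.contains "exfiltration" then "Data Exfiltration"
       else if s.contains "credential access" || s.contains "lateral movement" then
         "Credential Theft / Lateral Movement"
       else if s.contains "command and control" then "Command & Control"
       else if s.contains "persistence" || s.contains "privilege escalation" then
         "Persistence / Privilege Escalation"
       else if s.contains "initial access" || s.contains "execution" then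
         "Initial Access / Execution"
       else "Suspicious Activity") := rfl
  by_cases c0 : "impact" ∈ s
  · have hv : L.foldl pvStep 6 = 0 := by
      have := hle _ c0; rw [pvPrio_eq] at this; norm_num at this; omega
    rw [hA, pvB_eq L 0 hv]
    simp [c0, pvCategories, PySem.List.pyGetD, PySem.List.pyGet?, PySem.List.pyIdx?]
  · have n0 : L.foldl pvStep 6 ≠ 0 := by
      intro he; rcases hhit 0 (by norm_num) he with ⟨x, hp, hc⟩
      rw [pvRank0 x hp] at hc; exact c0 hc
    by_cases c1 : "exfiltration" ∈ s
    · have hv : L.foldl pvStep 6 = 1 := by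
        have := hle _ c1; rw [pvPrio_eq] at this; norm_num at this; omega
      rw [hA, pvB_eq L 1 hv]
      simp [c0, c1, pvCategories, PySem.List.pyGetD, PySem.List.pyGet?, PySem.List.pyIdx?]
    · have n1 : L.foldl pvStep 6 ≠ 1 := by
        intro he; rcases hhit 1 (by norm_num) he with ⟨x, hp, hc⟩
        rw [pvRank1 x hp] at hc; exact c1 hc
      by_cases c2 : "credential access" ∈ s
      · have hv : L.foldl pvStep 6 = 2 := by
          have := hle _ c2; rw [pvPrio_eq] at this; norm_num at this; omega
        rw [hA, pvB_eq L 2 hv]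
        simp [c0, c1, c2, pvCategories, PySem.List.pyGetD, PySem.List.pyGet?, PySem.List.pyIdx?]
      · by_cases c3 : "lateral movement" ∈ s
        · have hv : L.foldl pvStep 6 = 2 := by
            have := hle _ c3; rw [pvPrio_eq] at this; norm_num at this; omega
          rw [hA, pvB_eq L 2 hv]
          simp [c0, c1, c3, pvCategories, PySem.List.pyGetD, PySem.List.pyGet?, PySem.List.pyIdx?]
        · have n2 : L.foldl pvStep 6 ≠ 2 := by
            intro he; rcases hhit 2 (by norm_num) he with ⟨x, hp, hc⟩
            rcases pvRank2 x hp with rfl | rfl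
            · exact c2 hc
            · exact c3 hc
          by_cases c4 : "command and control" ∈ s
          · have hv : L.foldl pvStep 6 = 3 := by
              have := hle _ c4; rw [pvPrio_eq] at this; norm_num at this; omega
            rw [hA, pvB_eq L 3 hv]
            simp [c0, c1, c2, c3, c4, pvCategories, PySem.List.pyGetD, PySem.List.pyGet?, PySem.List.pyIdx?]
          · have n3 : L.foldl pvStep 6 ≠ 3 := by
              intro he; rcases hhit 3 (by norm_num) he with ⟨x, hp, hc⟩
              rw [pvRank3 x hp] at hc; exact c4 hc
            by_cases c5 : "persistence" ∈ s
            · have hv : L.foldl pvStep 6 = 4 := by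
                have := hle _ c5; rw [pvPrio_eq] at this; norm_num at this; omega
              rw [hA, pvB_eq L 4 hv]
              simp [c0, c1, c2, c3, c4, c5, pvCategories, PySem.List.pyGetD, PySem.List.pyGet?, PySem.List.pyIdx?]
            · by_cases c6 : "privilege escalation" ∈ s
              · have hv : L.foldl pvStep 6 = 4 := by
                  have := hle _ c6; rw [pvPrio_eq] at this; norm_num at this; omega
                rw [hA, pvB_eq L 4 hv]
                simp [c0, c1, c2, c3, c4, c6, pvCategories, PySem.List.pyGetD, PySem.List.pyGet?, PySem.List.pyIdx?]
              · have n4 : L.foldl pvStep 6 ≠ 4 := by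
                  intro he; rcases hhit 4 (by norm_num) he with ⟨x, hp, hc⟩
                  rcases pvRank4 x hp with rfl | rfl
                  · exact c5 hc
                  · exact c6 hc
                by_cases c7 : "initial access" ∈ s
                · have hv : L.foldl pvStep 6 = 5 := by
                    have := hle _ c7; rw [pvPrio_eq] at this; norm_num at this; omega
                  rw [hA, pvB_eq L 5 hv]
                  simp [c0, c1, c2, c3, c4, c5, c6, c7, pvCategories, PySem.List.pyGetD, PySem.List.pyGet?, PySem.List.pyIdx?]
                · by_cases c8 : "execution" ∈ s
                  · have hv : L.foldl pvStep 6 = 5 := by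
                      have := hle _ c8; rw [pvPrio_eq] at this; norm_num at this; omega
                    rw [hA, pvB_eq L 5 hv]
                    simp [c0, c1, c2, c3, c4, c5, c6, c8, pvCategories, PySem.List.pyGetD, PySem.List.pyGet?, PySem.List.pyIdx?]
                  · have n5 : L.foldl pvStep 6 ≠ 5 := by
                      intro he; rcases hhit 5 (by norm_num) he with ⟨x, hp, hc⟩
                      rcases pvRank5 x hp with rfl | rfl
                      · exact c7 hc
                      · exact c8 hc
                    have hv : L.foldl pvStep 6 = 6 := by omega
                    rw [hA, pvB_eq L 6 hv]
                    simp [c0, c1, c2, c3, c4, c5, c6, c7, c8, pvCategories, PySem.List.pyGetD, PySem.List.pyGet?, PySem.List.pyIdx?]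

-- ===== VERDICT (by name: the statement is the Claim_ definition above) =====
theorem determine_incident_category_py_spec : Claim_equal_determine_incident_category_py := by
  intro L _
  unfold Spec_determine_incident_category_py
  exact pv_main L
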